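-- pv_equiv track=rewrite | github.com/megobrien3d/hvh | modify_partitions.py | alternate
-- ===== SOURCE A (Python) =====
-- def alternate(jump_by, my_list):
--     list1 = []
--     list2 = []
--
--     first = True
--     curr_index = 0
--
--     while curr_index < len(my_list):
--         if first:
--             first = False
--             list1 += my_list[curr_index: curr_index + jump_by]
--         else:
--             first = True
--             list2 += my_list[curr_index: curr_index + jump_by]
--         curr_index += jump_by
--
--     return (list1, list2)
-- ===== SOURCE B (Python) =====
-- def alternate(jump_by, my_list):
--     chunks = [my_list[i:i + jump_by] for i in range(0, len(my_list), jump_by)]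
--     list1 = [x for idx, c in enumerate(chunks) if idx % 2 == 0 for x in c]
--     list2 = [x for idx, c in enumerate(chunks) if idx % 2 == 1 for x in c]
--     return (list1, list2)
-- ===== Notes on version B (the rewrite author's own statement) =====
-- stated objective: idiomatic
-- what changed: Replaces the stateful while-loop with its first/curr_index toggle by building all chunks at once with a stride range and splitting them by chunk-index parity.
-- outside the precondition, e.g. on alternate(0, []): A returns ([], []), B raises ValueError
import Mathlib
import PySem

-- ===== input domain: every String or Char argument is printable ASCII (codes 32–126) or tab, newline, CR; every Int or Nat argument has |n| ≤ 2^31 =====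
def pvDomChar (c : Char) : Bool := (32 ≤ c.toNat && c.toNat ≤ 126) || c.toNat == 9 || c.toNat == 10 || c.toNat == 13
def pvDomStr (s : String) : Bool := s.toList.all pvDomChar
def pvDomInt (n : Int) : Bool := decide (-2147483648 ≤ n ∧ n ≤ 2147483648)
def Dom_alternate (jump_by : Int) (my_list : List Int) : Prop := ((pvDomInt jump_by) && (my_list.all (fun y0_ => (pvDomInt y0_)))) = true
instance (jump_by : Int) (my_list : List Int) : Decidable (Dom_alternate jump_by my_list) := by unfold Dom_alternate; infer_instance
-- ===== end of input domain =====

-- B replaces A's stateful while-loop toggle by a chunk list built from a stride range,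
-- split by chunk-index parity (a different decomposition, same cost).


-- ===== PORT A =====
-- the while loop, fuel-bounded: on Pre_ inputs (jump_by > 0, or empty list) the fuel
-- my_list.length + 1 always suffices, since curr_index advances by at least 1 each step
def alternateLoop (jump_by : Int) (my_list : List Int) :
    Nat → Int → Bool → List Int → List Int → List Int × List Int
  | 0, _, _, list1, list2 => (list1, list2)
  | fuel + 1, curr_index, first, list1, list2 =>
    if curr_index < (my_list.length : Int) then
      if first then
        alternateLoop jump_by my_list fuel (curr_index + jump_by) false
          (list1 ++ PySem.List.slice my_list (some curr_index) (some (curr_index + jump_by))) list2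
      else
        alternateLoop jump_by my_list fuel (curr_index + jump_by) true
          list1 (list2 ++ PySem.List.slice my_list (some curr_index) (some (curr_index + jump_by)))
    else (list1, list2)

def alternate (jump_by : Int) (my_list : List Int) : List Int × List Int :=
  alternateLoop jump_by my_list (my_list.length + 1) 0 true [] []

-- ===== PORT B =====
def alternate_alt (jump_by : Int) (my_list : List Int) : List Int × List Int :=
  let chunks := (PySem.List.pyRange 0 (my_list.length : Int) jump_by).map
      (fun i => PySem.List.slice my_list (some i) (some (i + jump_by)))
  ((((PySem.List.enumerate chunks).filter (fun p => p.1 % 2 == 0)).map Prod.snd).flatten,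
   (((PySem.List.enumerate chunks).filter (fun p => p.1 % 2 == 1)).map Prod.snd).flatten)

-- ===== PRECONDITION & SPEC =====
-- Pre_ excludes jump_by ≤ 0 with a nonempty list (A loops forever there) and
-- jump_by = 0 with the empty list (A returns ([],[]) but B's range(0,0,0) raises ValueError).
def Pre_alternate (jump_by : Int) (my_list : List Int) : Prop :=
  0 < jump_by ∨ (jump_by ≠ 0 ∧ my_list = [])
instance (jump_by : Int) (my_list : List Int) : Decidable (Pre_alternate jump_by my_list) := by
  unfold Pre_alternate; infer_instance
def pvWitness_alternate : Int × List Int := (2, [1, 2, 3, 4, 5])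

def Spec_alternate (jump_by : Int) (my_list : List Int) (out : List Int × List Int) : Prop :=
  out = alternate_alt jump_by my_list
instance (jump_by : Int) (my_list : List Int) (out : List Int × List Int) :
    Decidable (Spec_alternate jump_by my_list out) := by unfold Spec_alternate; infer_instance

-- ===== CLAIM (what is proved, stated in full; the proofs are below) =====
def Claim_equal_alternate : Prop := ∀ (jump_by : Int) (my_list : List Int), Dom_alternate jump_by my_list → Pre_alternate jump_by my_list → Spec_alternate jump_by my_list (alternate jump_by my_list)

-- ===== LEMMAS AND PROOFS =====

-- alternating parity split of a list of chunks (both programs compute this)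
def split2 : List (List Int) → List Int × List Int
  | [] => ([], [])
  | c :: cs => (c ++ (split2 cs).2, (split2 cs).1)

-- A's loop without accumulators
def goA (j : Int) (xs : List Int) : Nat → Int → Bool → List Int × List Int
  | 0, _, _ => ([], [])
  | fuel + 1, i, first =>
    if i < (xs.length : Int) then
      let c := PySem.List.slice xs (some i) (some (i + j))
      let r := goA j xs fuel (i + j) (!first)
      if first then (c ++ r.1, r.2) else (r.1, c ++ r.2)
    else ([], [])

theorem alternateLoop_eq_goA (j : Int) (xs : List Int) :
    ∀ (fuel : Nat) (i : Int) (first : Bool) (l1 l2 : List Int),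
      alternateLoop j xs fuel i first l1 l2 =
        (l1 ++ (goA j xs fuel i first).1, l2 ++ (goA j xs fuel i first).2) := by
  intro fuel
  induction fuel with
  | zero => intro i first l1 l2; simp [alternateLoop, goA]
  | succ n ih =>
    intro i first l1 l2
    by_cases h : i < (xs.length : Int)
    · cases first <;> simp [alternateLoop, goA, h, ih, List.append_assoc]
    · simp [alternateLoop, goA, h]

theorem pyRange_cons_pos (a b s : Int) (hs : 0 < s) (hab : a < b) :
    PySem.List.pyRange a b s = a :: PySem.List.pyRange (a + s) b s := by
  rw [PySem.List.pyRange_of_pos _ _ hs, PySem.List.pyRange_of_pos _ _ hs]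
  have key : (b - a + s - 1) / s = (b - a - 1) / s + 1 := by
    have : b - a + s - 1 = (b - a - 1) + s * 1 := by ring
    rw [this, Int.add_mul_ediv_left _ _ (by omega : s ≠ 0)]
  have hcount : ((b - a + s - 1) / s).toNat =
      (if a + s < b then ((b - (a + s) + s - 1) / s).toNat else 0) + 1 := by
    by_cases h2 : a + s < b
    · have h0 : 0 ≤ (b - a - 1) / s := Int.ediv_nonneg (by omega) (by omega)
      have : b - (a + s) + s - 1 = b - a - 1 := by ring
      simp [h2, this, key]
      omega
    · have : (b - a - 1) / s = 0 := Int.ediv_eq_zero_of_lt (by omega) (by omega)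
      simp [h2, key, this]
  simp only [hab, if_pos, hcount]
  rw [List.range_succ_eq_map]
  simp [List.map_map, Function.comp]
  intro k _
  ring

theorem pyRange_nil_pos (a b s : Int) (hs : 0 < s) (hba : b ≤ a) :
    PySem.List.pyRange a b s = [] := by
  rw [PySem.List.pyRange_of_pos _ _ hs]
  simp [show ¬ a < b by omega]

-- B's enumerate/filter/flatten computes split2, with a parity swap for an odd start
theorem enum_split (cs : List (List Int)) :
    ∀ n : Int, 0 ≤ n →
      (((((PySem.List.enumerate cs n).filter (fun p => p.1 % 2 == 0)).map Prod.snd).flatten,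
        ((((PySem.List.enumerate cs n).filter (fun p => p.1 % 2 == 1)).map Prod.snd).flatten))
        : List Int × List Int) =
      (if n % 2 = 0 then split2 cs else ((split2 cs).2, (split2 cs).1)) := by
  induction cs with
  | nil => intro n _; simp [PySem.List.enumerate, split2]
  | cons c cs ih =>
    intro n hn
    rw [PySem.List.enumerate_cons]
    have ih' := ih (n + 1) (by omega)
    by_cases h : n % 2 = 0
    · have h1 : ¬ (n + 1) % 2 = 0 := by omega
      have h01 : ¬ (n % 2 == (1 : Int)) = true := by simp; omega
      have h00 : (n % 2 == (0 : Int)) = true := by simp [h]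
      simp only [List.filter_cons, h00, h01, if_pos, List.map_cons, List.flatten_cons]
      rw [if_neg h1] at ih'
      have e1 := congrArg Prod.fst ih'
      have e2 := congrArg Prod.snd ih'
      simp only at e1 e2
      simp [h, split2, e1, e2]
    · have h1 : (n + 1) % 2 = 0 := by omega
      have h01 : (n % 2 == (1 : Int)) = true := by simp; omega
      have h00 : ¬ (n % 2 == (0 : Int)) = true := by simp; omega
      simp only [List.filter_cons, h00, h01, if_pos, List.map_cons, List.flatten_cons]
      rw [if_pos h1] at ih'
      have e1 := congrArg Prod.fst ih'
      have e2 := congrArg Prod.snd ih'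
      simp only at e1 e2
      simp [h, split2, e1, e2]

-- A's loop computes split2 of the chunk list, with a swap when first = false
theorem goA_eq_split2 (j : Int) (xs : List Int) (hj : 0 < j) :
    ∀ (fuel : Nat) (i : Int), 0 ≤ i → (xs.length : Int) ≤ i + fuel * j → ∀ first : Bool,
      goA j xs fuel i first =
        (let P := split2 ((PySem.List.pyRange i (xs.length : Int) j).map
            (fun t => PySem.List.slice xs (some t) (some (t + j))))
         if first then P else (P.2, P.1)) := by
  intro fuel
  induction fuel with
  | zero =>
    intro i _ hle first
    rw [pyRange_nil_pos _ _ _ hj (by simpa using hle)]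
    cases first <;> simp [goA, split2]
  | succ n ih =>
    intro i hi hle first
    by_cases h : i < (xs.length : Int)
    · rw [pyRange_cons_pos _ _ _ hj h]
      have hle' : (xs.length : Int) ≤ (i + j) + n * j := by
        have h2 : ((n : Int) + 1) * j = n * j + j := by ring
        push_cast at hle
        omega
      have ih' := ih (i + j) (by omega) hle'
      cases first
      · simp only [goA, if_pos h, Bool.not_false, ih' true]
        simp [split2]
      · simp only [goA, if_pos h, Bool.not_true, ih' false]
        simp [split2]
    · rw [pyRange_nil_pos _ _ _ hj (by omega)]
      cases first <;> simp [goA, split2, h]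

-- pyRange a a s = [] for any step (used for the empty-list, negative-step case)
theorem pyRange_self (a s : Int) : PySem.List.pyRange a a s = [] := by
  simp [PySem.List.pyRange]

-- ===== VERDICT (by name: the statement is the Claim_ definition above) =====
theorem alternate_spec : Claim_equal_alternate := by
  intro j xs _ hpre
  unfold Spec_alternate alternate alternate_alt
  rcases hpre with hj | ⟨hj0, hnil⟩
  · -- jump_by > 0
    rw [alternateLoop_eq_goA]
    have hfuel : (xs.length : Int) ≤ 0 + (xs.length + 1 : Nat) * j := by
      have h1 : ((xs.length + 1 : Nat) : Int) * 1 ≤ ((xs.length + 1 : Nat) : Int) * j :=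
        mul_le_mul_of_nonneg_left hj (by positivity)
      push_cast at h1 ⊢
      omega
    rw [goA_eq_split2 j xs hj (xs.length + 1) 0 le_rfl hfuel true]
    have he := enum_split ((PySem.List.pyRange 0 (xs.length : Int) j).map
        (fun t => PySem.List.slice xs (some t) (some (t + j)))) 0 le_rfl
    rw [if_pos (by decide : (0 : Int) % 2 = 0)] at he
    simpa using he.symm
  · -- empty list, jump_by ≠ 0: both sides are ([], [])
    subst hnil
    simp [alternateLoop, pyRange_self]
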